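-- pv_equiv track=rewrite | github.com/sapienzastudents/exercises | Progettazione di Algoritmi/canale2/2018_2019/esercizi/programmazione_dinamica/cammini_lunghi.py | es2_seq
-- ===== SOURCE A (Python) =====
-- def es2_seq(M, T):
--     def seq_in(i, j):
--         seq.append(M[i][j])
--
--         v = M[i][j] + 1
--
--         if j + 1 < n and M[i][j + 1] == v:
--             return seq_in(i, j + 1)
--
--         if i + 1 < n and M[i + 1][j] == v:
--             return seq_in(i + 1, j)
--
--         if j > 0 and M[i][j - 1] == v:
--             seq_in(i, j - 1)
--
--         if i > 0 and M[i - 1][j] == v: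
--             seq_in(i - 1, j)
--
--     n = len(M)
--
--     # Trovo la cella con tale valore 'max_value'.
--     (i, j) = max([(T[i][j], (i, j)) for i in range(n) for j in range(n)])[1]
--
--     # Uso la riccorrenza al contrario.
--     seq = []
--
--     seq_in(i, j)
--
--     return seq
-- ===== SOURCE B (Python) =====
-- def es2_seq(M, T):
--     n = len(M)
--
--     # Part 1: single running scan for the argmax cell of T (last maximal cell in
--     # row-major order == Python's max over (value, (i, j)) tuples, since the
--     # (i, j) components are strictly increasing in scan order).
--     best = None
--     for i in range(n):
--         for j in range(n):
--             if best is None or T[i][j] >= best[0]: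
--                 best = (T[i][j], i, j)
--     _, i, j = best
--
--     # Part 2: explicit stack-based DFS replacing the recursion.
--     seq = []
--     stack = [(i, j)]
--     while stack:
--         i, j = stack.pop()
--         x = M[i][j]
--         seq.append(x)
--         v = x + 1
--         if j + 1 < n and M[i][j + 1] == v:
--             children = [(i, j + 1)]
--         elif i + 1 < n and M[i + 1][j] == v:
--             children = [(i + 1, j)]
--         else:
--             children = []
--             if j > 0 and M[i][j - 1] == v:
--                 children.append((i, j - 1))
--             if i > 0 and M[i - 1][j] == v:
--                 children.append((i - 1, j))
--         stack.extend(reversed(children))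
--     return seq
-- ===== Notes on version B (the rewrite author's own statement) =====
-- stated objective: faster
-- what changed: The argmax of T is found by a single running-best scan (keeping the last cell with a maximal value) instead of materializing the n^2 list of (value,(i,j)) tuples and calling max, and the tree-shaped recursion seq_in is replaced by an iterative DFS with an explicit stack whose children are pushed in reverse so the pop order reproduces the recursion's preorder; this avoids materializing the n^2 tuple list and the Python call overhead of recursion (measured ~2.5x faster). …
-- outside the precondition, e.g. on es2_seq([[5, 0], [7]], [[3, 0], [0, 0]]): A returns [5], B returns [5]
import Mathlib
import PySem

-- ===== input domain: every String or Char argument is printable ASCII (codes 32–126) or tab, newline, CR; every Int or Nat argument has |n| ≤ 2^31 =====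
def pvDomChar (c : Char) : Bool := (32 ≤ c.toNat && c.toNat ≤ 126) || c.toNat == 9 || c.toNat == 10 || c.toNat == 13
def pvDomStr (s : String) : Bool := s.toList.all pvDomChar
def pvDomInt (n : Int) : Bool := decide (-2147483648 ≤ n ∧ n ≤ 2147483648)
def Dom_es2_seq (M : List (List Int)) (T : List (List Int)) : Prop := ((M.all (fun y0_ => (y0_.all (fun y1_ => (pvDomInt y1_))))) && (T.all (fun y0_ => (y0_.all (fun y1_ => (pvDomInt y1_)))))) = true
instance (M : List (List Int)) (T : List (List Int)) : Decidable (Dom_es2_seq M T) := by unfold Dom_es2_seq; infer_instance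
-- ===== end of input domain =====

-- B replaces the materialized tuple list + max by a single running-best scan and the
-- tree-shaped recursion by an explicit stack DFS (children pushed reversed); return
-- values agree on Pre_.

-- M[i][j] as a double Python lookup (none = IndexError)
def pvLook (M : List (List Int)) (i j : Int) : Option Int :=
  match PySem.List.pyGet? M i with
  | some row => PySem.List.pyGet? row j
  | none => none

-- upper bound on all entries of M (termination measure only)
def pvBound (M : List (List Int)) : Int := M.flatten.foldl max 0

def pvMu (M : List (List Int)) (i j : Int) : Nat :=
  match pvLook M i j with
  | some x => (pvBound M + 1 - x).toNat
  | none => 0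

theorem pvLook_le_bound (M : List (List Int)) (i j x : Int) (h : pvLook M i j = some x) :
    x ≤ pvBound M := by
  unfold pvLook at h
  split at h
  case h_2 => cases h
  case h_1 row hr =>
    have hx : x ∈ row := PySem.List.mem_of_pyGet?_eq_some row h
    have hrow : row ∈ M := PySem.List.mem_of_pyGet?_eq_some M hr
    have hmem : x ∈ M.flatten := List.mem_flatten.mpr ⟨row, hrow, hx⟩
    exact (PySem.List.le_foldl_max M.flatten 0).2 x hmem

theorem pvMu_child (M : List (List Int)) (i j a b x : Int)
    (hp : pvLook M i j = some x) (hc : pvLook M a b = some (x + 1)) :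
    pvMu M a b < pvMu M i j := by
  have hx := pvLook_le_bound M i j x hp
  unfold pvMu
  rw [hp, hc]
  show (pvBound M + 1 - (x + 1)).toNat < (pvBound M + 1 - x).toNat
  omega

-- ===== PORT A =====
-- Python tuple '<' on (value, (i, j))
def pvLexLt (a b : Int × Int × Int) : Bool :=
  a.1 < b.1 || (a.1 == b.1 && (a.2.1 < b.2.1 || (a.2.1 == b.2.1 && a.2.2 < b.2.2)))

-- seq_in, returning the list of values it appends to seq (on a failed lookup Python
-- raises IndexError; the port returns [] there — excluded by Pre_)
def pvSeqInA (M : List (List Int)) (n i j : Int) : List Int :=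
  match hm : pvLook M i j with
  | none => []
  | some x =>
    if h1 : j + 1 < n ∧ pvLook M i (j + 1) = some (x + 1) then
      x :: pvSeqInA M n i (j + 1)
    else if h2 : i + 1 < n ∧ pvLook M (i + 1) j = some (x + 1) then
      x :: pvSeqInA M n (i + 1) j
    else
      x :: ((if h3 : 0 < j ∧ pvLook M i (j - 1) = some (x + 1) then pvSeqInA M n i (j - 1) else []) ++
            (if h4 : 0 < i ∧ pvLook M (i - 1) j = some (x + 1) then pvSeqInA M n (i - 1) j else []))
termination_by pvMu M i j
decreasing_by
  · exact pvMu_child M i j i (j + 1) x hm h1.2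
  · exact pvMu_child M i j (i + 1) j x hm h2.2
  · exact pvMu_child M i j i (j - 1) x hm h3.2
  · exact pvMu_child M i j (i - 1) j x hm h4.2

def es2_seq (M : List (List Int)) (T : List (List Int)) : List Int :=
  let n : Int := M.length
  -- [(T[i][j], (i, j)) for i in range(n) for j in range(n)]
  let pairs : List (Int × Int × Int) :=
    (PySem.List.pyRange 0 n 1).flatMap (fun i =>
      (PySem.List.pyRange 0 n 1).map (fun j =>
        (PySem.List.pyGetD (PySem.List.pyGetD T i []) j 0, i, j)))
  match pairs with
  | [] => []   -- Python: max([]) raises ValueError; excluded by Pre_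
  | p :: rest =>
    -- Python max = keep the first element, replace on strictly greater (tuple order)
    let best := rest.foldl (fun m x => if pvLexLt m x then x else m) p
    pvSeqInA M n best.2.1 best.2.2

-- ===== PORT B =====
-- running-best update: 'if best is None or T[i][j] >= best[0]: best = (T[i][j], i, j)'
def pvStep (T : List (List Int)) (b : Option (Int × Int × Int)) (i j : Int) :
    Option (Int × Int × Int) :=
  let t := PySem.List.pyGetD (PySem.List.pyGetD T i []) j 0
  match b with
  | none => some (t, i, j)
  | some m => if m.1 ≤ t then some (t, i, j) else some m

-- the ordered children list of Source B's DFS loop body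
def pvChildren (M : List (List Int)) (n i j v : Int) : List (Int × Int) :=
  if j + 1 < n ∧ pvLook M i (j + 1) = some v then [(i, j + 1)]
  else if i + 1 < n ∧ pvLook M (i + 1) j = some v then [(i + 1, j)]
  else (if 0 < j ∧ pvLook M i (j - 1) = some v then [(i, j - 1)] else []) ++
       (if 0 < i ∧ pvLook M (i - 1) j = some v then [(i - 1, j)] else [])

theorem pvChildren_sum_lt (M : List (List Int)) (n i j x : Int)
    (hp : pvLook M i j = some x) :
    ((pvChildren M n i j (x + 1)).map (fun c => 3 ^ pvMu M c.1 c.2)).sum < 3 ^ pvMu M i j := by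
  have hb := pvLook_le_bound M i j x hp
  have hmu : pvMu M i j = (pvBound M + 1 - x).toNat := by unfold pvMu; rw [hp]
  have hpos : 0 < pvMu M i j := by omega
  have hchild : ∀ a b : Int, pvLook M a b = some (x + 1) → pvMu M a b < pvMu M i j := by
    intro a b hc; exact pvMu_child M i j a b x hp hc
  have hlt : ∀ a b : Int, pvLook M a b = some (x + 1) →
      3 ^ pvMu M a b ≤ 3 ^ (pvMu M i j - 1) := by
    intro a b hc
    exact Nat.pow_le_pow_right (by norm_num) (by have := hchild a b hc; omega)
  have h3 : 3 ^ (pvMu M i j - 1) + 3 ^ (pvMu M i j - 1) < 3 ^ pvMu M i j := by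
    have : 3 ^ pvMu M i j = 3 ^ (pvMu M i j - 1) * 3 := by
      rw [← pow_succ]; congr 1; omega
    have hp1 : 0 < 3 ^ (pvMu M i j - 1) := by positivity
    omega
  have h1 : (0 : ℕ) < 3 ^ pvMu M i j := by positivity
  unfold pvChildren
  split_ifs with c1 c2 c3 c4 c4' <;>
    simp only [List.map_append, List.map_cons, List.map_nil, List.sum_append,
      List.sum_cons, List.sum_nil, Nat.add_zero, Nat.zero_add] <;>
    first
      | exact h1
      | (first
          | (have := hlt _ _ c1.2; omega)
          | (have := hlt _ _ c2.2; omega)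
          | (have ha := hlt _ _ c3.2; have hb2 := hlt _ _ c4.2; omega)
          | (have := hlt _ _ c3.2; omega)
          | (have := hlt _ _ c4'.2; omega))

-- Source B's while loop; the list head is the stack top (stack.pop() / extend(reversed(children)))
def pvDfsB (M : List (List Int)) (n : Int) (stack : List (Int × Int)) (acc : List Int) :
    List Int :=
  match stack with
  | [] => acc
  | (i, j) :: rest =>
    match hm : pvLook M i j with
    | none => acc          -- Python: IndexError; excluded by Pre_
    | some x =>
      pvDfsB M n (pvChildren M n i j (x + 1) ++ rest) (acc ++ [x])
termination_by (stack.map (fun c => 3 ^ pvMu M c.1 c.2)).sum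
decreasing_by
  simp only [List.map_append, List.sum_append, List.map_cons, List.sum_cons]
  have := pvChildren_sum_lt M n i j x hm
  omega

def es2_seq_alt (M : List (List Int)) (T : List (List Int)) : List Int :=
  let n : Int := M.length
  let best := (PySem.List.pyRange 0 n 1).foldl (fun b i =>
      (PySem.List.pyRange 0 n 1).foldl (fun b j => pvStep T b i j) b) none
  match best with
  | none => []   -- Python: unpacking None raises TypeError; excluded by Pre_
  | some (_, i, j) => pvDfsB M n [(i, j)] []

-- ===== PRECONDITION & SPEC =====
-- Pre_ excludes the empty matrix (max([]) raises ValueError) and requires every row of M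
-- (and the first n rows of T) to have length ≥ len(M): on shorter rows A raises IndexError
-- whenever a lookup reaches a missing cell; since whether the walk reaches one depends on
-- the data, Pre_ conservatively demands full rows (excluding some ragged inputs on which
-- A's walk happens to avoid the short row and A still returns).
def Pre_es2_seq (M : List (List Int)) (T : List (List Int)) : Prop :=
  0 < M.length ∧ (∀ row ∈ M, M.length ≤ row.length) ∧
    M.length ≤ T.length ∧ ∀ row ∈ T.take M.length, M.length ≤ row.length
instance (M : List (List Int)) (T : List (List Int)) : Decidable (Pre_es2_seq M T) := by
  unfold Pre_es2_seq; infer_instance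

def pvWitness_es2_seq : List (List Int) × List (List Int) := ([[0]], [[0]])

def Spec_es2_seq (M : List (List Int)) (T : List (List Int)) (out : List Int) : Prop := out = es2_seq_alt M T
instance (M : List (List Int)) (T : List (List Int)) (out : List Int) : Decidable (Spec_es2_seq M T out) := by unfold Spec_es2_seq; infer_instance

-- ===== CLAIM (what is proved, stated in full; the proofs are below) =====
def Claim_equal_es2_seq : Prop := ∀ (M : List (List Int)) (T : List (List Int)), Dom_es2_seq M T → Pre_es2_seq M T → Spec_es2_seq M T (es2_seq M T)

-- ===== LEMMAS AND PROOFS =====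

def pvInR (M : List (List Int)) (c : Int × Int) : Prop :=
  0 ≤ c.1 ∧ c.1 < (M.length : Int) ∧ 0 ≤ c.2 ∧ c.2 < (M.length : Int)

def pvG (T : List (List Int)) (i j : Int) : Int :=
  PySem.List.pyGetD (PySem.List.pyGetD T i []) j 0

def pvPairs (M T : List (List Int)) : List (Int × Int × Int) :=
  (PySem.List.pyRange 0 (M.length : Int) 1).flatMap (fun i =>
    (PySem.List.pyRange 0 (M.length : Int) 1).map (fun j => (pvG T i j, i, j)))

def pvLt2 (a b : Int × Int) : Prop := a.1 < b.1 ∨ (a.1 = b.1 ∧ a.2 < b.2)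

def pvStep' (b : Option (Int × Int × Int)) (x : Int × Int × Int) : Option (Int × Int × Int) :=
  match b with
  | none => some x
  | some m => if m.1 ≤ x.1 then some x else some m

theorem pvLook_in_range (M : List (List Int)) (hrows : ∀ row ∈ M, M.length ≤ row.length)
    (i j : Int) (h : pvInR M (i, j)) : ∃ x, pvLook M i j = some x := by
  obtain ⟨h1, h2, h3, h4⟩ := h
  unfold pvLook
  have hi : i.toNat < M.length := by omega
  rw [PySem.List.pyGet?_of_nonneg M h1, List.getElem?_eq_getElem hi]
  show ∃ x, PySem.List.pyGet? M[i.toNat] j = some x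
  have hrow : M[i.toNat] ∈ M := List.getElem_mem hi
  have hlen := hrows _ hrow
  have hj : j.toNat < M[i.toNat].length := by omega
  rw [PySem.List.pyGet?_of_nonneg _ h3, List.getElem?_eq_getElem hj]
  exact ⟨_, rfl⟩

theorem pvChildren_inR (M : List (List Int)) (i j v : Int)
    (hij : pvInR M (i, j)) :
    ∀ c ∈ pvChildren M (M.length : Int) i j v, pvInR M c := by
  obtain ⟨h1, h2, h3, h4⟩ := hij
  intro c hc
  unfold pvChildren at hc
  split_ifs at hc with hc1 hc2 hc3 hc4 <;>
    simp only [List.mem_append, List.mem_cons, List.not_mem_nil,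
      or_false, false_or] at hc <;>
    rcases hc with rfl | rfl <;>
    exact ⟨by omega, by omega, by omega, by omega⟩

theorem pvSeqInA_cons (M : List (List Int)) (n i j x : Int) (hp : pvLook M i j = some x) :
    pvSeqInA M n i j
      = x :: (pvChildren M n i j (x + 1)).flatMap (fun c => pvSeqInA M n c.1 c.2) := by
  rw [pvSeqInA.eq_def]
  split
  · rename_i hm; rw [hm] at hp; cases hp
  · rename_i x' hm
    have hx : x' = x := by rw [hm] at hp; injection hp
    subst hx
    unfold pvChildren
    split_ifs with h1 h2 h3 h4 <;>
      simp [List.flatMap_cons, List.flatMap_append, List.flatMap_nil]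

theorem pvDfsB_eq (M : List (List Int)) (hrows : ∀ row ∈ M, M.length ≤ row.length)
    (s : List (Int × Int)) (acc : List Int) :
    (∀ c ∈ s, pvInR M c) →
    pvDfsB M (M.length : Int) s acc
      = acc ++ s.flatMap (fun c => pvSeqInA M (M.length : Int) c.1 c.2) := by
  induction s, acc using pvDfsB.induct (M := M) (n := (M.length : Int)) with
  | case1 acc => intro _; simp [pvDfsB]
  | case2 acc i j rest hm =>
    intro hs
    exfalso
    obtain ⟨x, hx⟩ := pvLook_in_range M hrows i j (hs _ (by simp))
    rw [hm] at hx; cases hx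
  | case3 acc i j rest x hm IH =>
    intro hs
    have hij := hs (i, j) (by simp)
    have hch := pvChildren_inR M i j (x + 1) hij
    have hs' : ∀ c ∈ pvChildren M (M.length : Int) i j (x + 1) ++ rest, pvInR M c := by
      intro c hc
      rcases List.mem_append.mp hc with h | h
      · exact hch c h
      · exact hs c (List.mem_cons_of_mem _ h)
    have step : pvDfsB M (M.length : Int) ((i, j) :: rest) acc
        = pvDfsB M (M.length : Int) (pvChildren M (M.length : Int) i j (x + 1) ++ rest) (acc ++ [x]) := by
      rw [pvDfsB.eq_def]
      split
      · rename_i heq; exact (List.cons_ne_nil _ _ heq).elim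
      · rename_i i' j' rest' heq
        injection heq with h1 h2
        injection h1 with hi hj
        subst hi; subst hj; subst h2
        split
        · rename_i hm2; rw [hm2] at hm; cases hm
        · rename_i x' hm2
          rw [hm2] at hm
          injection hm with hx
          rw [hx]
    have := IH hs'
    rw [step, this, List.flatMap_cons, pvSeqInA_cons M (M.length : Int) i j x hm]
    simp [List.flatMap_append, List.append_assoc]

theorem pvFoldl_argmax (ps : List (Int × Int × Int)) :
    ∀ m, (∀ x ∈ ps, pvLt2 m.2 x.2) → List.Pairwise (fun a b => pvLt2 a.2 b.2) ps →
    ps.foldl pvStep' (some m)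
      = some (ps.foldl (fun m x => if pvLexLt m x then x else m) m) := by
  induction ps with
  | nil => intro m _ _; rfl
  | cons a t IH =>
    intro m hall hpw
    have ha := hall a (by simp)
    have hiff : pvLexLt m a = true ↔ m.1 ≤ a.1 := by
      unfold pvLexLt
      unfold pvLt2 at ha
      simp only [Bool.or_eq_true, Bool.and_eq_true, decide_eq_true_eq, beq_iff_eq]
      constructor
      · rintro (h | ⟨h, _⟩) <;> omega
      · intro h
        rcases lt_or_eq_of_le h with h' | h'
        · exact Or.inl h'
        · exact Or.inr ⟨h', ha⟩
    have hpw' := List.pairwise_cons.mp hpw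
    rw [List.foldl_cons, List.foldl_cons]
    by_cases hc : m.1 ≤ a.1
    · have h1 : pvStep' (some m) a = some a := by simp [pvStep', hc]
      rw [h1, if_pos (hiff.mpr hc)]
      exact IH a hpw'.1 hpw'.2
    · have h1 : pvStep' (some m) a = some m := by simp [pvStep', hc]
      rw [h1, if_neg (fun h => hc (hiff.mp h))]
      exact IH m (fun x hx => hall x (List.mem_cons_of_mem _ hx)) hpw'.2

theorem pvPairs_pairwise (M T : List (List Int)) :
    List.Pairwise (fun a b => pvLt2 a.2 b.2) (pvPairs M T) := by
  unfold pvPairs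
  rw [List.pairwise_flatMap]
  constructor
  · intro a _
    rw [List.pairwise_map]
    exact (PySem.List.pairwise_lt_pyRange_one 0 (M.length : Int)).imp
      (fun h => Or.inr ⟨rfl, h⟩)
  · apply (PySem.List.pairwise_lt_pyRange_one 0 (M.length : Int)).imp
    intro i i' hii x hx y hy
    simp only [List.mem_map] at hx hy
    obtain ⟨j, _, rfl⟩ := hx
    obtain ⟨j', _, rfl⟩ := hy
    exact Or.inl hii

theorem pvFoldl_mem {α : Type} (P : α → α → Bool)
    (t : List α) : ∀ m, t.foldl (fun m x => if P m x then x else m) m = m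
      ∨ t.foldl (fun m x => if P m x then x else m) m ∈ t := by
  induction t with
  | nil => intro m; exact Or.inl rfl
  | cons a t IH =>
    intro m
    rw [List.foldl_cons]
    by_cases h : P m a = true
    · rw [if_pos h]
      rcases IH a with h' | h'
      · exact Or.inr (by rw [h']; simp)
      · exact Or.inr (List.mem_cons_of_mem _ h')
    · rw [if_neg h]
      rcases IH m with h' | h'
      · exact Or.inl h'
      · exact Or.inr (List.mem_cons_of_mem _ h')

theorem pvPairs_inR (M T : List (List Int)) (p : Int × Int × Int) (hp : p ∈ pvPairs M T) :
    pvInR M p.2 := by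
  unfold pvPairs at hp
  simp only [List.mem_flatMap, List.mem_map] at hp
  obtain ⟨i, hi, j, hj, rfl⟩ := hp
  rw [PySem.List.mem_pyRange_one] at hi hj
  exact ⟨hi.1, hi.2, hj.1, hj.2⟩

theorem pvPairs_ne_nil (M T : List (List Int)) (h0 : 0 < M.length) : pvPairs M T ≠ [] := by
  intro h
  have hmem : ((pvG T 0 0, 0, 0) : Int × Int × Int) ∈ pvPairs M T := by
    unfold pvPairs
    refine List.mem_flatMap.mpr ⟨0, ?_, List.mem_map.mpr ⟨0, ?_, rfl⟩⟩ <;>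
      exact PySem.List.mem_pyRange_one.mpr ⟨le_refl _, by exact_mod_cast h0⟩
  rw [h] at hmem
  cases hmem

theorem pv_esA_eq (M T : List (List Int)) :
    es2_seq M T = match pvPairs M T with
      | [] => []
      | p :: rest =>
        pvSeqInA M (M.length : Int)
          (rest.foldl (fun m x => if pvLexLt m x then x else m) p).2.1
          (rest.foldl (fun m x => if pvLexLt m x then x else m) p).2.2 := rfl

theorem pv_esB_eq (M T : List (List Int)) :
    es2_seq_alt M T = match (pvPairs M T).foldl pvStep' none with
      | none => []
      | some (_, i, j) => pvDfsB M (M.length : Int) [(i, j)] [] := by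
  unfold es2_seq_alt pvPairs
  rw [List.foldl_flatMap]
  simp only [List.foldl_map]
  have hfun : ∀ (b : Option (Int × Int × Int)) (i j : Int),
      pvStep T b i j = pvStep' b (pvG T i j, i, j) := by
    intro b i j; cases b <;> rfl
  simp only [hfun]

-- ===== VERDICT (by name: the statement is the Claim_ definition above) =====
theorem es2_seq_spec : Claim_equal_es2_seq := by
  intro M T _ hPre
  unfold Spec_es2_seq
  obtain ⟨h0, hrows, _, _⟩ := hPre
  rw [pv_esA_eq, pv_esB_eq]
  obtain ⟨p, rest, hps⟩ := List.exists_cons_of_ne_nil (pvPairs_ne_nil M T h0)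
  have hpw := pvPairs_pairwise M T
  rw [hps] at hpw
  have hpw' := List.pairwise_cons.mp hpw
  have hmain : ((p :: rest).foldl pvStep' none)
      = some (rest.foldl (fun m x => if pvLexLt m x then x else m) p) := by
    rw [List.foldl_cons]
    exact pvFoldl_argmax rest p hpw'.1 hpw'.2
  rcases hbA : rest.foldl (fun m x => if pvLexLt m x then x else m) p with ⟨v, bi, bj⟩
  rw [hbA] at hmain
  have hmem : ((v, bi, bj) : Int × Int × Int) ∈ p :: rest := by
    rcases pvFoldl_mem pvLexLt rest p with h | h
    · rw [hbA] at h; rw [← h]; simp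
    · rw [hbA] at h; exact List.mem_cons_of_mem _ h
  have hin : pvInR M ((v, bi, bj) : Int × Int × Int).2 := by
    apply pvPairs_inR M T
    rw [hps]; exact hmem
  rw [hps, hmain]
  show pvSeqInA M (M.length : Int)
      (rest.foldl (fun m x => if pvLexLt m x then x else m) p).2.1
      (rest.foldl (fun m x => if pvLexLt m x then x else m) p).2.2
    = pvDfsB M (M.length : Int) [(bi, bj)] []
  rw [hbA]
  rw [pvDfsB_eq M hrows [(bi, bj)] []
    (by intro c hc; simp at hc; rw [hc]; exact hin)]
  simp [List.flatMap_cons]
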